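-- pv_equiv track=rewrite | github.com/agamjotsingh1/EE1080 | assignments/1/q3/main.py | I_to_dec
-- ===== SOURCE A (Python) =====
-- def I_to_dec(I):
--     n = len(I)
--     N = len(I[0])
--
--     dec_I = []
--
--     for j in range(N):
--         bin_sum = 0
--         for i in range(n):
--             if(I[i][j]):
--                 bin_sum += 1 << i
--         dec_I.append(bin_sum)
--
--     return dec_I
-- ===== SOURCE B (Python) =====
-- def I_to_dec(I):
--     N = len(I[0])
--     dec = [0] * N
--     w = 1
--     for row in I:
--         dec = [dec[j] + w if row[j] else dec[j] for j in range(N)]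
--         w <<= 1
--     return dec
-- ===== Notes on version B (the rewrite author's own statement) =====
-- stated objective: faster
-- what changed: Column-major double loop (recomputing one column sum at a time, re-indexing I[i][j] and shifting per bit) replaced by a single row-major pass that maintains all N column accumulators at once, adding the row's weight w (doubled once per row) at truthy positions.
import Mathlib
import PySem

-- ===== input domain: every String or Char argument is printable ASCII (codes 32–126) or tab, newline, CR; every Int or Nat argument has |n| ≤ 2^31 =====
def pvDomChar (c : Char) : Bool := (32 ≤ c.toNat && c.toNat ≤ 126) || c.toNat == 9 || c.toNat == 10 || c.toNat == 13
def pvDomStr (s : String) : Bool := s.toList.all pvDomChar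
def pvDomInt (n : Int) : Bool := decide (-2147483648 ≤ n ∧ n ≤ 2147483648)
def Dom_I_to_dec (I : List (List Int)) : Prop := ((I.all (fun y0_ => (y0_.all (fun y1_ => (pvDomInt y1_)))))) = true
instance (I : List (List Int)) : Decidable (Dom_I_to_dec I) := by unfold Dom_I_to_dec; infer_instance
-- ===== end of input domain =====

-- B computes the same list by a different decomposition: one row-major pass maintaining
-- all N column accumulators, instead of A's column-major recomputation per column.

-- ===== PORT A =====
-- column-major: for each column j, sum 2^i over rows i whose entry at j is truthy
def I_to_dec (I : List (List Int)) : List Int :=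
  let n := I.length
  let N := (I.headD []).length
  (List.range N).map (fun j =>
    (List.range n).foldl (fun bin_sum i =>
      if (I.getD i []).getD j 0 ≠ 0 then bin_sum + 2 ^ i else bin_sum) 0)

-- ===== PORT B =====
-- row-major: fold over rows carrying (dec, w); each row adds w at its truthy positions, then w doubles
def I_to_dec_alt (I : List (List Int)) : List Int :=
  let N := (I.headD []).length
  (I.foldl (fun (st : List Int × Int) row =>
      ((List.range N).map (fun j =>
         if row.getD j 0 ≠ 0 then st.1.getD j 0 + st.2 else st.1.getD j 0), st.2 * 2))
    (List.replicate N 0, 1)).1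

-- ===== PRECONDITION & SPEC =====
-- Pre: exactly where Python A returns: I nonempty and every row at least as long as the first
-- (otherwise I[0] / I[i][j] raises IndexError).
def Pre_I_to_dec (I : List (List Int)) : Prop :=
  I ≠ [] ∧ ∀ row ∈ I, (I.headD []).length ≤ row.length
instance (I : List (List Int)) : Decidable (Pre_I_to_dec I) := by unfold Pre_I_to_dec; infer_instance
def pvWitness_I_to_dec : List (List Int) := [[1, 0], [0, 1], [1, 1]]

def Spec_I_to_dec (I : List (List Int)) (out : List Int) : Prop := out = I_to_dec_alt I
instance (I : List (List Int)) (out : List Int) : Decidable (Spec_I_to_dec I out) := by unfold Spec_I_to_dec; infer_instance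

-- ===== CLAIM (what is proved, stated in full; the proofs are below) =====
def Claim_equal_I_to_dec : Prop := ∀ (I : List (List Int)), Dom_I_to_dec I → Pre_I_to_dec I → Spec_I_to_dec I (I_to_dec I)

-- ===== LEMMAS AND PROOFS =====

-- the column value both programs compute, as structural recursion over the rows
def colVal : List (List Int) → Nat → Int
  | [], _ => 0
  | row :: rest, j => (if row.getD j 0 ≠ 0 then 1 else 0) + 2 * colVal rest j

lemma colVal_append_single (I : List (List Int)) (row : List Int) (j : Nat) :
    colVal (I ++ [row]) j = colVal I j + 2 ^ I.length * (if row.getD j 0 ≠ 0 then 1 else 0) := by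
  induction I with
  | nil => simp [colVal]
  | cons r rest ih => simp [colVal, ih, pow_succ]; split_ifs <;> ring

lemma A_col (I : List (List Int)) (j : Nat) :
    (List.range I.length).foldl (fun bin_sum i =>
      if (I.getD i []).getD j 0 ≠ 0 then bin_sum + 2 ^ i else bin_sum) 0 = colVal I j := by
  induction I using List.reverseRecOn with
  | nil => simp [colVal]
  | append_singleton I' row ih =>
    rw [List.length_append, List.length_singleton, List.range_succ, List.foldl_append]
    have hcong : (List.range I'.length).foldl (fun (bin_sum : Int) i =>
        if ((I' ++ [row]).getD i []).getD j 0 ≠ 0 then bin_sum + 2 ^ i else bin_sum) 0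
        = (List.range I'.length).foldl (fun (bin_sum : Int) i =>
        if (I'.getD i []).getD j 0 ≠ 0 then bin_sum + 2 ^ i else bin_sum) 0 := by
      apply PySem.List.foldl_congr_mem
      intro a i hi
      have hlt : i < I'.length := List.mem_range.mp hi
      rw [List.getD_append _ _ _ _ hlt]
    have hrow : (I' ++ [row]).getD I'.length [] = row := by
      rw [List.getD_eq_getElem _ _ (by simp)]
      simp
    simp only [List.foldl_cons, List.foldl_nil, hrow]
    rw [hcong, ih, colVal_append_single]
    split_ifs <;> ring

lemma B_inv (I : List (List Int)) (N : Nat) (f : Nat → Int) (w : Int) :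
    (I.foldl (fun (st : List Int × Int) row =>
      ((List.range N).map (fun j =>
         if row.getD j 0 ≠ 0 then st.1.getD j 0 + st.2 else st.1.getD j 0), st.2 * 2))
      ((List.range N).map f, w)).1
    = (List.range N).map (fun j => f j + w * colVal I j) := by
  induction I generalizing f w with
  | nil => simp [colVal]
  | cons row rest ih =>
    simp only [List.foldl_cons]
    have hget : ∀ j ∈ List.range N, ((List.range N).map f).getD j 0 = f j := by
      intro j hj
      have hlt : j < N := List.mem_range.mp hj
      rw [List.getD_eq_getElem _ _ (by simpa using hlt)]
      simp
    have hmap : (List.range N).map (fun j =>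
        if row.getD j 0 ≠ 0 then ((List.range N).map f).getD j 0 + w
        else ((List.range N).map f).getD j 0)
        = (List.range N).map (fun j => if row.getD j 0 ≠ 0 then f j + w else f j) := by
      apply List.map_congr_left
      intro j hj
      rw [hget j hj]
    rw [hmap, ih]
    apply List.map_congr_left
    intro j _
    simp only [colVal]
    split_ifs <;> ring

lemma replicate_as_map (N : Nat) : List.replicate N (0 : Int) = (List.range N).map (fun _ => 0) := by
  simp [List.map_const']

-- ===== VERDICT (by name: the statement is the Claim_ definition above) =====
theorem I_to_dec_spec : Claim_equal_I_to_dec := by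
  intro I _ _
  simp only [Spec_I_to_dec, I_to_dec, I_to_dec_alt]
  rw [replicate_as_map, B_inv]
  apply List.map_congr_left
  intro j _
  rw [A_col]
  ring
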